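-- pv_equiv track=rewrite | github.com/Slash0BZ/pytorch-pretrained-BERT | scripts/process_srl_data.py | get_stripped
-- ===== SOURCE A (Python) =====
-- def get_stripped(tokens, tags, orig_verb_pos):
--     new_tokens = []
--     new_verb_pos = -1
--     for i in range(0, len(tokens)):
--         if tags[i] != "O":
--             new_tokens.append(tokens[i])
--         if i == orig_verb_pos:
--             new_verb_pos = len(new_tokens) - 1
--     return new_tokens, new_verb_pos
-- ===== SOURCE B (Python) =====
-- def get_stripped(tokens, tags, orig_verb_pos):
--     new_tokens = [tok for tok, tag in zip(tokens, tags) if tag != "O"]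
--     if 0 <= orig_verb_pos < len(tokens):
--         new_verb_pos = sum(1 for j in range(orig_verb_pos + 1) if tags[j] != "O") - 1
--     else:
--         new_verb_pos = -1
--     return new_tokens, new_verb_pos
-- ===== Notes on version B (the rewrite author's own statement) =====
-- stated objective: simpler
-- what changed: Replaced the single interleaved loop that filters while tracking the verb position with two independent passes: a comprehension over zip(tokens, tags) builds the filtered list, and the verb position is computed separately as an inclusive prefix count of non-O tags (or -1 when orig_verb_pos is out of range).
import Mathlib
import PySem

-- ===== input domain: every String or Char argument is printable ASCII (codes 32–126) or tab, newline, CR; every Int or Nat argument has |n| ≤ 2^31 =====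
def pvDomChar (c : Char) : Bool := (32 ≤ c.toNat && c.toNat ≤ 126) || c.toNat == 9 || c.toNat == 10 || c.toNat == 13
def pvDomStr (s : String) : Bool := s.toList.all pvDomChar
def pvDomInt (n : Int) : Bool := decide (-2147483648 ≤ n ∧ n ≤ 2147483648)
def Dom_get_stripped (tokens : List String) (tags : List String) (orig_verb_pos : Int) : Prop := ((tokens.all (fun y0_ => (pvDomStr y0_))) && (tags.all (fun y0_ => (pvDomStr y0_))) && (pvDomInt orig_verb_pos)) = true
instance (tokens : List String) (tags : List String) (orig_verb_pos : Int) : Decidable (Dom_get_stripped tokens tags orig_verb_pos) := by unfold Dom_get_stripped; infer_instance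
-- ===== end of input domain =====

-- B replaces A's single interleaved filter-and-track loop with two independent passes
-- (filter by comprehension over zip; locate the verb by an inclusive prefix count): simpler decomposition, same cost.

-- ===== PORT A =====
-- literal port of A's loop: state (new_tokens, new_verb_pos) over i in range(0, len(tokens)); tags[i]/tokens[i] via pyGetD (always in range under Pre_)
def get_stripped (tokens : List String) (tags : List String) (orig_verb_pos : Int) : List String × Int :=
  (PySem.List.pyRange 0 (tokens.length : Int) 1).foldl
    (fun (st : List String × Int) i =>
      let nt := if PySem.List.pyGetD tags i "" ≠ "O" then st.1 ++ [PySem.List.pyGetD tokens i ""] else st.1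
      let nv := if i = orig_verb_pos then (nt.length : Int) - 1 else st.2
      (nt, nv))
    ([], -1)

-- ===== PORT B =====
-- first component: the comprehension [tok for tok, tag in zip(tokens, tags) if tag != "O"]
-- second component: sum(1 for j in range(orig_verb_pos+1) if tags[j] != "O") - 1, guarded by 0 <= orig_verb_pos < len(tokens)
def get_stripped_alt (tokens : List String) (tags : List String) (orig_verb_pos : Int) : List String × Int :=
  ((tokens.zip tags).filterMap (fun p => if p.2 ≠ "O" then some p.1 else none),
   if 0 ≤ orig_verb_pos ∧ orig_verb_pos < (tokens.length : Int) then
     (PySem.List.pyRange 0 (orig_verb_pos + 1) 1).foldl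
       (fun (acc : Int) j => if PySem.List.pyGetD tags j "" ≠ "O" then acc + 1 else acc) 0 - 1
   else -1)

-- ===== PRECONDITION & SPEC =====
-- A indexes tags[i] for every i < len(tokens), raising IndexError when tags is shorter; exactly those inputs are excluded.
def Pre_get_stripped (tokens : List String) (tags : List String) (orig_verb_pos : Int) : Prop :=
  tokens.length ≤ tags.length
instance (tokens : List String) (tags : List String) (orig_verb_pos : Int) : Decidable (Pre_get_stripped tokens tags orig_verb_pos) := by unfold Pre_get_stripped; infer_instance
def pvWitness_get_stripped : List String × List String × Int := (["a", "b", "c"], ["O", "B-V", "I"], 1)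

def Spec_get_stripped (tokens : List String) (tags : List String) (orig_verb_pos : Int) (out : List String × Int) : Prop := out = get_stripped_alt tokens tags orig_verb_pos
instance (tokens : List String) (tags : List String) (orig_verb_pos : Int) (out : List String × Int) : Decidable (Spec_get_stripped tokens tags orig_verb_pos out) := by unfold Spec_get_stripped; infer_instance

-- ===== CLAIM (what is proved, stated in full; the proofs are below) =====
def Claim_equal_get_stripped : Prop := ∀ (tokens : List String) (tags : List String) (orig_verb_pos : Int), Dom_get_stripped tokens tags orig_verb_pos → Pre_get_stripped tokens tags orig_verb_pos → Spec_get_stripped tokens tags orig_verb_pos (get_stripped tokens tags orig_verb_pos)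

-- ===== LEMMAS AND PROOFS =====

-- the filtered prefix of length n (what A's new_tokens holds after processing indices 0..n-1)
def pvFilt (tokens tags : List String) (n : Nat) : List String :=
  ((tokens.take n).zip (tags.take n)).filterMap (fun p => if p.2 ≠ "O" then some p.1 else none)

lemma pvFilt_succ (tokens tags : List String) (n : Nat) (h1 : n < tokens.length) (h2 : n < tags.length) :
    pvFilt tokens tags (n + 1) =
      pvFilt tokens tags n ++ (if tags[n] ≠ "O" then [tokens[n]] else []) := by
  unfold pvFilt
  have ht1 : tokens.take (n + 1) = tokens.take n ++ [tokens[n]] := by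
    rw [List.take_add_one, List.getElem?_eq_getElem h1, Option.toList_some]
  have ht2 : tags.take (n + 1) = tags.take n ++ [tags[n]] := by
    rw [List.take_add_one, List.getElem?_eq_getElem h2, Option.toList_some]
  have hlen : (tokens.take n).length = (tags.take n).length := by
    simp [List.length_take]; omega
  rw [ht1, ht2, List.zip_append hlen, List.filterMap_append]
  by_cases h : tags[n] = "O" <;> simp [h]

lemma pv_zip_take (xs ys : List String) : xs.zip (ys.take xs.length) = xs.zip ys := by
  induction xs generalizing ys with
  | nil => simp
  | cons x xs ih =>
    cases ys with
    | nil => simp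
    | cons y ys => simp [List.take_succ_cons, ih]

-- B's prefix-count fold equals the length of the filtered prefix
lemma pvCount_eq_length (tokens tags : List String) (m : Nat) (hm1 : m ≤ tokens.length) (hm2 : m ≤ tags.length) :
    (PySem.List.pyRange 0 (m : Int) 1).foldl
        (fun (acc : Int) j => if PySem.List.pyGetD tags j "" ≠ "O" then acc + 1 else acc) 0
      = ((pvFilt tokens tags m).length : Int) := by
  induction m with
  | zero => simp [PySem.List.pyRange_one_eq_nil, pvFilt]
  | succ k ih =>
    have hk1 : k ≤ tokens.length := Nat.le_of_succ_le hm1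
    have hk2 : k ≤ tags.length := Nat.le_of_succ_le hm2
    have hklt2 : k < tags.length := Nat.lt_of_succ_le hm2
    have hcast : ((k + 1 : Nat) : Int) = (k : Int) + 1 := by push_cast; ring
    rw [hcast, PySem.List.pyRange_one_succ_right (Int.natCast_nonneg k), List.foldl_append,
      ih hk1 hk2, pvFilt_succ tokens tags k (Nat.lt_of_succ_le hm1) hklt2]
    have hget : PySem.List.pyGetD tags (k : Int) "" = tags[k]'hklt2 := by
      rw [PySem.List.pyGetD_eq_getElem tags "" (Int.natCast_nonneg k) (by exact_mod_cast hklt2)]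
      simp
    simp only [List.foldl_cons, List.foldl_nil, hget]
    split_ifs <;> simp

-- invariant of A's fold over the first n indices
lemma pvFoldA_eq (tokens tags : List String) (orig_verb_pos : Int) (n : Nat)
    (hn1 : n ≤ tokens.length) (hn2 : n ≤ tags.length) :
    (PySem.List.pyRange 0 (n : Int) 1).foldl
      (fun (st : List String × Int) i =>
        let nt := if PySem.List.pyGetD tags i "" ≠ "O" then st.1 ++ [PySem.List.pyGetD tokens i ""] else st.1
        let nv := if i = orig_verb_pos then (nt.length : Int) - 1 else st.2
        (nt, nv))
      ([], -1)
    = (pvFilt tokens tags n,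
        if 0 ≤ orig_verb_pos ∧ orig_verb_pos < (n : Int) then
          ((pvFilt tokens tags (orig_verb_pos.toNat + 1)).length : Int) - 1
        else -1) := by
  induction n with
  | zero => simp [PySem.List.pyRange_one_eq_nil, pvFilt]
  | succ k ih =>
    have hk1 : k ≤ tokens.length := Nat.le_of_succ_le hn1
    have hk2 : k ≤ tags.length := Nat.le_of_succ_le hn2
    have hklt1 : k < tokens.length := Nat.lt_of_succ_le hn1
    have hklt2 : k < tags.length := Nat.lt_of_succ_le hn2
    have hcast : ((k + 1 : Nat) : Int) = (k : Int) + 1 := by push_cast; ring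
    rw [hcast, PySem.List.pyRange_one_succ_right (Int.natCast_nonneg k), List.foldl_append, ih hk1 hk2]
    have hgetTag : PySem.List.pyGetD tags (k : Int) "" = tags[k]'hklt2 := by
      rw [PySem.List.pyGetD_eq_getElem tags "" (Int.natCast_nonneg k) (by exact_mod_cast hklt2)]; simp
    have hgetTok : PySem.List.pyGetD tokens (k : Int) "" = tokens[k]'hklt1 := by
      rw [PySem.List.pyGetD_eq_getElem tokens "" (Int.natCast_nonneg k) (by exact_mod_cast hklt1)]; simp
    have hstep : pvFilt tokens tags (k + 1) =
        if tags[k]'hklt2 ≠ "O" then pvFilt tokens tags k ++ [tokens[k]'hklt1] else pvFilt tokens tags k := by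
      rw [pvFilt_succ tokens tags k hklt1 hklt2]; split_ifs <;> simp
    simp only [List.foldl_cons, List.foldl_nil, hgetTag, hgetTok]
    by_cases hvk : (k : Int) = orig_verb_pos
    · -- this step sets new_verb_pos
      subst hvk
      rw [← hstep]
      have hc : (0 ≤ (k : Int) ∧ (k : Int) < (k : Int) + 1) := ⟨Int.natCast_nonneg k, by omega⟩
      simp [hc, Int.toNat_natCast]
    · have hiff : (0 ≤ orig_verb_pos ∧ orig_verb_pos < (k : Int) + 1) ↔
          (0 ≤ orig_verb_pos ∧ orig_verb_pos < (k : Int)) := by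
        constructor <;> rintro ⟨ha, hb⟩ <;> exact ⟨ha, by omega⟩
      rw [hstep]
      simp only [if_neg hvk, hiff]

-- ===== VERDICT (by name: the statement is the Claim_ definition above) =====
theorem get_stripped_spec : Claim_equal_get_stripped := by
  intro tokens tags orig_verb_pos _ hpre
  unfold Spec_get_stripped get_stripped get_stripped_alt
  rw [pvFoldA_eq tokens tags orig_verb_pos tokens.length le_rfl hpre]
  have hfilt : pvFilt tokens tags tokens.length =
      (tokens.zip tags).filterMap (fun p => if p.2 ≠ "O" then some p.1 else none) := by
    unfold pvFilt
    rw [List.take_length, pv_zip_take]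
  simp only [Prod.mk.injEq]
  refine ⟨hfilt, ?_⟩
  by_cases hr : 0 ≤ orig_verb_pos ∧ orig_verb_pos < (tokens.length : Int)
  · simp only [if_pos hr]
    have hm1 : orig_verb_pos.toNat + 1 ≤ tokens.length := by omega
    have hm2 : orig_verb_pos.toNat + 1 ≤ tags.length := le_trans hm1 hpre
    have hcast : ((orig_verb_pos.toNat + 1 : Nat) : Int) = orig_verb_pos + 1 := by omega
    rw [← hcast, pvCount_eq_length tokens tags (orig_verb_pos.toNat + 1) hm1 hm2]
  · simp only [if_neg hr]
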